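-- pv_equiv track=rewrite | github.com/TCatherine/iot-botnet-detection-rl | agents/utils.py | add_metrics
-- ===== SOURCE A (Python) =====
-- def add_metrics(string, fp, fn, tp, tn):
--     for str in string:
--         words = str.split(' ')
--         fp += int(words[3])
--         fn += int(words[5])
--         tp += int(words[7])
--         tn += int(words[9])
--     return fp, fn, tp, tn
-- ===== SOURCE B (Python) =====
-- def add_metrics(string, fp, fn, tp, tn):
--     rows = []
--     for line in string:
--         words = line.split(' ')
--         rows.append((int(words[3]), int(words[5]), int(words[7]), int(words[9])))
--     return (fp + sum(r[0] for r in rows),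
--             fn + sum(r[1] for r in rows),
--             tp + sum(r[2] for r in rows),
--             tn + sum(r[3] for r in rows))
-- ===== Notes on version B (the rewrite author's own statement) =====
-- stated objective: alternative
-- what changed: B first builds an explicit table of parsed (words[3],[5],[7],[9]) rows in one parsing pass, then aggregates each column in separate summation passes, instead of A's single interleaved four-accumulator loop.
import Mathlib
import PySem

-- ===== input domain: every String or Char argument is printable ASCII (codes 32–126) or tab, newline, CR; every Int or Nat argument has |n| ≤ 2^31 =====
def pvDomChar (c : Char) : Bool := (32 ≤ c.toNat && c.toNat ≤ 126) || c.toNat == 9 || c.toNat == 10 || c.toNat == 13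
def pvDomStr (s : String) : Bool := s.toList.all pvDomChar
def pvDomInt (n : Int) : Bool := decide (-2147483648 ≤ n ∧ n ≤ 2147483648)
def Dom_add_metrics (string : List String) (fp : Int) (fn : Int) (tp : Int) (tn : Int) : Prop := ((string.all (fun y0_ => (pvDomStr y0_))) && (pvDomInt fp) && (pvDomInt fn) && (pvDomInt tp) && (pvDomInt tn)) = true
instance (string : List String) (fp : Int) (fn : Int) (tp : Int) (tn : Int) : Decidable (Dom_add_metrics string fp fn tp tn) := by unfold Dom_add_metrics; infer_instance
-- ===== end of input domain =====

-- B builds an explicit parsed-rows table in one pass and then sums each column in a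
-- separate pass, instead of A's single interleaved four-accumulator loop (alternative decomposition).

-- words = line.split(' '): sep is the nonempty " ", so split? is always some
def pvWords (s : String) : List String := (PySem.Str.split? s " ").getD []

-- int(words[i]); the getD defaults are never reached under Pre_
def pvField (words : List String) (i : Int) : Int :=
  (PySem.Int.ofStr? ((PySem.List.pyGet? words i).getD "")).getD 0

-- ===== PORT A =====
def add_metrics (string : List String) (fp : Int) (fn : Int) (tp : Int) (tn : Int) : Int × Int × Int × Int :=
  string.foldl (fun st s =>
    let words := pvWords s
    (st.1 + pvField words 3, st.2.1 + pvField words 5,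
     st.2.2.1 + pvField words 7, st.2.2.2 + pvField words 9))
    (fp, fn, tp, tn)

-- ===== PORT B =====
def pvRow (s : String) : Int × Int × Int × Int :=
  let words := pvWords s
  (pvField words 3, pvField words 5, pvField words 7, pvField words 9)

def add_metrics_alt (string : List String) (fp : Int) (fn : Int) (tp : Int) (tn : Int) : Int × Int × Int × Int :=
  let rows := string.foldl (fun acc s => acc ++ [pvRow s]) ([] : List (Int × Int × Int × Int))
  (fp + rows.foldl (fun a r => a + r.1) 0,
   fn + rows.foldl (fun a r => a + r.2.1) 0,
   tp + rows.foldl (fun a r => a + r.2.2.1) 0,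
   tn + rows.foldl (fun a r => a + r.2.2.2) 0)

-- ===== PRECONDITION & SPEC =====
-- Pre_ excludes exactly the lines where Python raises: fewer than 10 space-split words
-- (IndexError) or a field that int() rejects (ValueError).
def pvLineOK (s : String) : Bool :=
  let ws := pvWords s
  decide (10 ≤ ws.length) &&
    (PySem.Int.ofStr? (ws.getD 3 "")).isSome && (PySem.Int.ofStr? (ws.getD 5 "")).isSome &&
    (PySem.Int.ofStr? (ws.getD 7 "")).isSome && (PySem.Int.ofStr? (ws.getD 9 "")).isSome

def Pre_add_metrics (string : List String) (fp : Int) (fn : Int) (tp : Int) (tn : Int) : Prop :=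
  string.all pvLineOK = true
instance (string : List String) (fp : Int) (fn : Int) (tp : Int) (tn : Int) : Decidable (Pre_add_metrics string fp fn tp tn) := by unfold Pre_add_metrics; infer_instance

def pvWitness_add_metrics : List String × Int × Int × Int × Int :=
  (["a b c 1 d 2 e 3 f 4"], 1, 2, 3, 4)

def Spec_add_metrics (string : List String) (fp : Int) (fn : Int) (tp : Int) (tn : Int) (out : Int × Int × Int × Int) : Prop := out = add_metrics_alt string fp fn tp tn
instance (string : List String) (fp : Int) (fn : Int) (tp : Int) (tn : Int) (out : Int × Int × Int × Int) : Decidable (Spec_add_metrics string fp fn tp tn out) := by unfold Spec_add_metrics; infer_instance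

-- ===== CLAIM (what is proved, stated in full; the proofs are below) =====
def Claim_equal_add_metrics : Prop := ∀ (string : List String) (fp : Int) (fn : Int) (tp : Int) (tn : Int), Dom_add_metrics string fp fn tp tn → Pre_add_metrics string fp fn tp tn → Spec_add_metrics string fp fn tp tn (add_metrics string fp fn tp tn)

-- ===== LEMMAS AND PROOFS =====

lemma add_metrics_alt_eq_map (string : List String) (fp fn tp tn : Int) :
    add_metrics_alt string fp fn tp tn =
      (fp + ((string.map pvRow).map (·.1)).sum,
       fn + ((string.map pvRow).map (·.2.1)).sum,
       tp + ((string.map pvRow).map (·.2.2.1)).sum,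
       tn + ((string.map pvRow).map (·.2.2.2)).sum) := by
  unfold add_metrics_alt
  rw [PySem.List.foldl_append_singleton_eq_map, List.nil_append]
  simp only [PySem.List.foldl_add]
  simp

lemma add_metrics_eq (string : List String) (fp fn tp tn : Int) :
    add_metrics string fp fn tp tn = add_metrics_alt string fp fn tp tn := by
  induction string generalizing fp fn tp tn with
  | nil => simp [add_metrics, add_metrics_alt]
  | cons s l ih =>
    rw [add_metrics_alt_eq_map]
    have := ih (fp + pvField (pvWords s) 3) (fn + pvField (pvWords s) 5)
      (tp + pvField (pvWords s) 7) (tn + pvField (pvWords s) 9)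
    rw [add_metrics_alt_eq_map] at this
    simp only [add_metrics, List.foldl_cons] at this ⊢
    rw [this]
    simp only [List.map_cons, List.sum_cons, pvRow, Prod.mk.injEq]
    refine ⟨by ring, by ring, by ring, by ring⟩

-- ===== VERDICT (by name: the statement is the Claim_ definition above) =====
theorem add_metrics_spec : Claim_equal_add_metrics := by
  intro string fp fn tp tn _ _
  unfold Spec_add_metrics
  exact add_metrics_eq string fp fn tp tn
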